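-- pv_equiv track=rewrite | github.com/Anirudh-rao/Problem-Solving-With-Python | 5.Pattern Questions/13.HollowTriangle.py | generate_hollow_right_angled_triangle
-- ===== SOURCE A (Python) =====
-- def generate_hollow_right_angled_triangle(n):
--     """
--     Function to return a hollow right-angled triangle of '*' of side n as a list of strings.
--
--     Parameters:
--     n (int): The height of the triangle.
--
--     Returns:
--     list: A list of strings where each string represents a row of the hollow triangle.
--     """
--     # Initialize an empty list to store the rows of the triangle
--     triangle = []
--
--     # Loop through each row from 1 to n
--     for i in range(1, n + 1):
--         # For the first row, just add one star
--         if i == 1: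
--             triangle.append('*')
--         # For the last row, add 'n' stars
--         elif i == n:
--             triangle.append('*' * n)
--         # For the intermediate rows, add a star, spaces, and another star
--         else:
--             # Add the row: one star, and one star
--             triangle.append('*' + ' ' * (i - 2) + '*')
--
--     # Return the list of triangle rows
--     return triangle
-- ===== SOURCE B (Python) =====
-- def generate_hollow_right_angled_triangle(n):
--     """Hollow right triangle built by a per-cell membership test over a 2D grid."""
--     rows = []
--     for i in range(1, n + 1):
--         rows.append(''.join(['*' if i == n or j == 0 or j == i - 1 else ' ' for j in range(i)]))
--     return rows
-- ===== Notes on version B (the rewrite author's own statement) =====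
-- stated objective: alternative
-- what changed: Replaced A's per-row closed-form string formulas with three special cases by a uniform nested loop that decides each cell of the grid individually ('*' iff bottom row, left edge or right edge) and joins the cells.
import Mathlib
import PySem

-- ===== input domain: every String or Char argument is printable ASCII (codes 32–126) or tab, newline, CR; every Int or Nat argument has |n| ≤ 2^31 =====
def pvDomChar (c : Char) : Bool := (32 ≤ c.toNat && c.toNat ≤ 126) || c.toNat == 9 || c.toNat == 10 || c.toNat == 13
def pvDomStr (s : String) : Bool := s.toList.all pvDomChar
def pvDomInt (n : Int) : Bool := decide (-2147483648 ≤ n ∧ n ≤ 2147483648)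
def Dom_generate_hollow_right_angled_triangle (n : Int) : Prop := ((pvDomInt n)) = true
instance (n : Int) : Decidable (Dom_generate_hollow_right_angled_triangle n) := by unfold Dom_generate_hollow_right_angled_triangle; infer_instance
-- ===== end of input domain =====

-- ===== PORT A =====
-- B replaces A's per-row closed-form formulas by a uniform per-cell membership test; return value only, no speed claim.
def generate_hollow_right_angled_triangle (n : Int) : List String :=
  (PySem.List.pyRange 1 (n + 1) 1).foldl (fun triangle i =>
    if i == 1 then triangle ++ ["*"]
    else if i == n then triangle ++ [String.ofList (List.replicate n.toNat '*')]
    else triangle ++ [String.ofList ('*' :: (List.replicate (i - 2).toNat ' ' ++ ['*']))]) []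

-- ===== PORT B =====
def generate_hollow_right_angled_triangle_alt (n : Int) : List String :=
  (PySem.List.pyRange 1 (n + 1) 1).foldl (fun rows i =>
    rows ++ [String.ofList ((PySem.List.pyRange 0 i 1).map
      (fun j => if i == n || j == 0 || j == i - 1 then '*' else ' '))]) []

-- ===== PRECONDITION & SPEC =====
def Spec_generate_hollow_right_angled_triangle (n : Int) (out : List String) : Prop := out = generate_hollow_right_angled_triangle_alt n
instance (n : Int) (out : List String) : Decidable (Spec_generate_hollow_right_angled_triangle n out) := by unfold Spec_generate_hollow_right_angled_triangle; infer_instance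

-- ===== CLAIM (what is proved, stated in full; the proofs are below) =====
def Claim_equal_generate_hollow_right_angled_triangle : Prop := ∀ (n : Int), Dom_generate_hollow_right_angled_triangle n → Spec_generate_hollow_right_angled_triangle n (generate_hollow_right_angled_triangle n)

-- ===== LEMMAS AND PROOFS =====



-- A's row as a named function (what A appends for row i)
def rowA (n i : Int) : String :=
  if i == 1 then "*"
  else if i == n then String.ofList (List.replicate n.toNat '*')
  else String.ofList ('*' :: (List.replicate (i - 2).toNat ' ' ++ ['*']))

-- the character grid B builds for row i, as a map
def cellsB (n i : Int) : List Char :=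
  (PySem.List.pyRange 0 i 1).map (fun j => if i == n || j == 0 || j == i - 1 then '*' else ' ')

lemma cells_eq (n i : Int) (h1 : 1 <= i) (h2 : i <= n) :
    cellsB n i =
      (if i = 1 then ['*']
       else if i = n then List.replicate n.toNat '*'
       else '*' :: (List.replicate (i - 2).toNat ' ' ++ ['*'])) := by
  unfold cellsB
  rw [PySem.List.pyRange_one]
  split_ifs with hi1 hin
  · subst hi1; norm_num [List.range_succ]
  · subst hin
    apply List.ext_getElem
    · simp
    · intro m hm1 hm2
      simp
  · have hne : (i == n) = false := by simp [hin]
    apply List.ext_getElem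
    · simp; omega
    · intro m hm1 hm2
      simp only [List.getElem_map, List.getElem_range]
      have hmlt : m < i.toNat := by simpa using hm1
      rw [hne]
      by_cases hm0 : m = 0
      · subst hm0; simp
      · obtain ⟨k, rfl⟩ : ∃ k, m = k + 1 := ⟨m - 1, by omega⟩
        simp only [List.getElem_cons_succ]
        by_cases hk : k < (i - 2).toNat
        · rw [List.getElem_append_left (by simpa using hk)]
          simp only [List.getElem_replicate]
          simp
          omega
        · have hk' : k = (i - 2).toNat := by
            have := List.length_replicate (n := (i - 2).toNat) (a := ' ')
            omega
          rw [List.getElem_append_right (by simp; omega)]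
          simp
          omega

lemma row_eq (n i : Int) (h1 : 1 <= i) (h2 : i <= n) :
    rowA n i =
      String.ofList ((PySem.List.pyRange 0 i 1).map
        (fun j => if i == n || j == 0 || j == i - 1 then '*' else ' ')) := by
  have := cells_eq n i h1 h2
  unfold cellsB at this
  rw [this]
  unfold rowA
  split_ifs with hi1 hin <;> simp_all

-- ===== VERDICT (by name: the statement is the Claim_ definition above) =====
theorem generate_hollow_right_angled_triangle_spec : Claim_equal_generate_hollow_right_angled_triangle := by
  intro n _
  unfold Spec_generate_hollow_right_angled_triangle
  unfold generate_hollow_right_angled_triangle generate_hollow_right_angled_triangle_alt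
  have hA : (fun (triangle : List String) (i : Int) =>
      if i == 1 then triangle ++ ["*"]
      else if i == n then triangle ++ [String.ofList (List.replicate n.toNat '*')]
      else triangle ++ [String.ofList ('*' :: (List.replicate (i - 2).toNat ' ' ++ ['*']))])
      = fun triangle i => triangle ++ [rowA n i] := by
    funext acc i
    unfold rowA
    split_ifs <;> rfl
  rw [hA]
  rw [PySem.List.foldl_append_singleton_eq_map, PySem.List.foldl_append_singleton_eq_map]
  apply congrArg
  apply List.map_congr_left
  intro i hi
  rw [PySem.List.mem_pyRange_one] at hi
  exact row_eq n i hi.1 (by omega)
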